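-- pv_equiv track=rewrite | github.com/tanvisinghal-0105/personalized-shopping | server/evaluation/run_eval.py | _detect_session_type
-- ===== SOURCE A (Python) =====
-- def _detect_session_type(session_data: dict) -> str:
--     """Detect whether a session is Home Decor, Shopping, or mixed."""
--     trajectory = session_data.get("predicted_trajectory", [])
--     tool_names = [tc.get("tool_name", "") for tc in trajectory]
--     home_decor_tools = {
--         "start_home_decor_consultation",
--         "continue_home_decor_consultation",
--         "create_style_moodboard",
--         "visualize_room_with_products",
--         "analyze_room_with_history",
--     }
--     shopping_tools = {
--         "modify_cart",
--         "access_cart_information",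
--         "check_product_availability",
--         "display_product_search_results",
--         "get_product_recommendations",
--         "lookup_warranty_details",
--         "get_trade_in_value",
--         "sync_ask_for_approval",
--     }
--     hd_count = sum(1 for t in tool_names if t in home_decor_tools)
--     sh_count = sum(1 for t in tool_names if t in shopping_tools)
--     if hd_count > 0 and sh_count == 0:
--         return "home_decor"
--     if sh_count > 0 and hd_count == 0:
--         return "shopping"
--     if hd_count > 0 and sh_count > 0:
--         return "mixed"
--     return "unknown"
-- ===== SOURCE B (Python) =====
-- _CATEGORY = {}
-- for _t in ("start_home_decor_consultation", "continue_home_decor_consultation",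
--            "create_style_moodboard", "visualize_room_with_products",
--            "analyze_room_with_history"):
--     _CATEGORY[_t] = "home_decor"
-- for _t in ("modify_cart", "access_cart_information", "check_product_availability",
--            "display_product_search_results", "get_product_recommendations",
--            "lookup_warranty_details", "get_trade_in_value", "sync_ask_for_approval"):
--     _CATEGORY[_t] = "shopping"
--
--
-- def _detect_session_type(session_data: dict) -> str:
--     """Detect whether a session is Home Decor, Shopping, or mixed."""
--     seen = set()
--     for tc in session_data.get("predicted_trajectory", []):
--         cat = _CATEGORY.get(tc.get("tool_name", ""))
--         if cat is not None:
--             seen.add(cat)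
--     if seen == {"home_decor"}:
--         return "home_decor"
--     if seen == {"shopping"}:
--         return "shopping"
--     if seen:
--         return "mixed"
--     return "unknown"
-- ===== Notes on version B (the rewrite author's own statement) =====
-- stated objective: simpler
-- what changed: Replaced the two membership-count scans over the tool-name list with one pass that looks each tool up in a single tool->category dict and maintains a set of seen category labels, classifying from that set.
import Mathlib
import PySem

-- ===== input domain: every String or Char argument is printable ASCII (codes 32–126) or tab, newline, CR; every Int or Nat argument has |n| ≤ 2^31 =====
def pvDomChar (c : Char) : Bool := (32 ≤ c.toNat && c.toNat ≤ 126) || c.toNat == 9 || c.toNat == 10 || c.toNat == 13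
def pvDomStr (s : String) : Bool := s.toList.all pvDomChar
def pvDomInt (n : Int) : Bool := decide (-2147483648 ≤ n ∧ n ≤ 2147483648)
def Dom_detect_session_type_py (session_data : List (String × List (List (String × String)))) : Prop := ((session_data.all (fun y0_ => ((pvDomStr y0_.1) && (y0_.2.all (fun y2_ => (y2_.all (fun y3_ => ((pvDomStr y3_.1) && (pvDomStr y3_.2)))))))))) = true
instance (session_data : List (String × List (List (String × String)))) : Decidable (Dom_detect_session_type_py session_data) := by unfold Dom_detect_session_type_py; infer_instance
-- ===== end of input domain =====

-- B replaces A's two count-passes with one dict-lookup pass maintaining a set of seen category labels (objective: simpler).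

-- ===== PORT A =====
def pvHomeDecorTools : PySem.Set String := PySem.Set.ofList
  ["start_home_decor_consultation", "continue_home_decor_consultation",
   "create_style_moodboard", "visualize_room_with_products", "analyze_room_with_history"]

def pvShoppingTools : PySem.Set String := PySem.Set.ofList
  ["modify_cart", "access_cart_information", "check_product_availability",
   "display_product_search_results", "get_product_recommendations",
   "lookup_warranty_details", "get_trade_in_value", "sync_ask_for_approval"]

def detect_session_type_py (session_data : List (String × List (List (String × String)))) : String :=
  let trajectory := PySem.Dict.getD (PySem.Dict.mk session_data) "predicted_trajectory" []
  let tool_names := trajectory.map (fun tc => PySem.Dict.getD (PySem.Dict.mk tc) "tool_name" "")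
  let hd_count : Int := tool_names.foldl (fun a t => if PySem.Set.contains pvHomeDecorTools t then a + 1 else a) 0
  let sh_count : Int := tool_names.foldl (fun a t => if PySem.Set.contains pvShoppingTools t then a + 1 else a) 0
  if hd_count > 0 ∧ sh_count = 0 then "home_decor"
  else if sh_count > 0 ∧ hd_count = 0 then "shopping"
  else if hd_count > 0 ∧ sh_count > 0 then "mixed"
  else "unknown"

-- ===== PORT B =====
def pvCategory : PySem.Dict String String :=
  let d := ["start_home_decor_consultation", "continue_home_decor_consultation",
            "create_style_moodboard", "visualize_room_with_products",
            "analyze_room_with_history"].foldl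
           (fun d t => d.insert t "home_decor") (PySem.Dict.empty : PySem.Dict String String)
  ["modify_cart", "access_cart_information", "check_product_availability",
   "display_product_search_results", "get_product_recommendations",
   "lookup_warranty_details", "get_trade_in_value", "sync_ask_for_approval"].foldl
  (fun d t => d.insert t "shopping") d

def detect_session_type_py_alt (session_data : List (String × List (List (String × String)))) : String :=
  let seen : PySem.Set String :=
    (PySem.Dict.getD (PySem.Dict.mk session_data) "predicted_trajectory" []).foldl
      (fun s tc =>
        match pvCategory.get? (PySem.Dict.getD (PySem.Dict.mk tc) "tool_name" "") with
        | some cat => PySem.Set.add s cat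
        | none => s)
      PySem.Set.empty
  if PySem.Set.equal seen ["home_decor"] then "home_decor"
  else if PySem.Set.equal seen ["shopping"] then "shopping"
  else if !seen.isEmpty then "mixed"
  else "unknown"

-- ===== PRECONDITION & SPEC =====
def Spec_detect_session_type_py (session_data : List (String × List (List (String × String)))) (out : String) : Prop := out = detect_session_type_py_alt session_data
instance (session_data : List (String × List (List (String × String)))) (out : String) : Decidable (Spec_detect_session_type_py session_data out) := by unfold Spec_detect_session_type_py; infer_instance

-- ===== CLAIM (what is proved, stated in full; the proofs are below) =====
def Claim_equal_detect_session_type_py : Prop := ∀ (session_data : List (String × List (List (String × String)))), Dom_detect_session_type_py session_data → Spec_detect_session_type_py session_data (detect_session_type_py session_data)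

-- ===== LEMMAS AND PROOFS =====

theorem pv_count_foldl (p : String → Bool) (names : List String) (a : Int) :
    names.foldl (fun a t => if p t then a + 1 else a) a = a + (names.countP p : Int) := by
  induction names generalizing a with
  | nil => simp
  | cons x xs ih =>
    simp only [List.foldl_cons, List.countP_cons, ih]
    split_ifs <;> push_cast <;> ring

set_option maxHeartbeats 2000000 in
theorem pv_cat_get? (t : String) :
    pvCategory.get? t =
      (if pvHomeDecorTools.contains t then some "home_decor"
       else if pvShoppingTools.contains t then some "shopping"
       else none) := by
  simp only [pvCategory, pvHomeDecorTools, pvShoppingTools, List.foldl,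
    PySem.Dict.get?_insert, PySem.Dict.get?_empty, PySem.Set.contains_eq_listContains]
  by_cases h0 : t = "start_home_decor_consultation"
  · subst h0; simp
  ·
    by_cases h1 : t = "continue_home_decor_consultation"
    · subst h1; simp
    ·
      by_cases h2 : t = "create_style_moodboard"
      · subst h2; simp
      ·
        by_cases h3 : t = "visualize_room_with_products"
        · subst h3; simp
        ·
          by_cases h4 : t = "analyze_room_with_history"
          · subst h4; simp
          ·
            by_cases h5 : t = "modify_cart"
            · subst h5; simp
            ·
              by_cases h6 : t = "access_cart_information"
              · subst h6; simp
              ·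
                by_cases h7 : t = "check_product_availability"
                · subst h7; simp
                ·
                  by_cases h8 : t = "display_product_search_results"
                  · subst h8; simp
                  ·
                    by_cases h9 : t = "get_product_recommendations"
                    · subst h9; simp
                    ·
                      by_cases h10 : t = "lookup_warranty_details"
                      · subst h10; simp
                      ·
                        by_cases h11 : t = "get_trade_in_value"
                        · subst h11; simp
                        ·
                          by_cases h12 : t = "sync_ask_for_approval"
                          · subst h12; simp
                          ·
                            simp [h0, h1, h2, h3, h4, h5, h6, h7, h8, h9, h10, h11, h12]

theorem pv_disj (t : String) (h1 : pvHomeDecorTools.contains t = true)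
    (h2 : pvShoppingTools.contains t = true) : False := by
  simp [pvHomeDecorTools, pvShoppingTools] at h1 h2
  rcases h1 with h|h|h|h|h <;> subst h <;> simp at h2

theorem pv_seen_mem (names : List String) (s : PySem.Set String) (y : String) :
    (y ∈ names.foldl
        (fun s t => match pvCategory.get? t with
          | some cat => PySem.Set.add s cat
          | none => s) s) ↔
      (y ∈ s ∨ (y = "home_decor" ∧ ∃ t ∈ names, pvHomeDecorTools.contains t = true)
             ∨ (y = "shopping" ∧ ∃ t ∈ names, pvShoppingTools.contains t = true)) := by
  induction names generalizing s with
  | nil => simp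
  | cons x xs ih =>
    simp only [List.foldl_cons, pv_cat_get? x]
    by_cases hhd : pvHomeDecorTools.contains x = true
    · have hsh : pvShoppingTools.contains x = false := by
        rw [Bool.eq_false_iff]; exact fun h => pv_disj x hhd h
      simp only [hhd, hsh, if_true, ih, PySem.Set.mem_add, List.exists_mem_cons_iff]
      simp only [Bool.false_eq_true, false_or]
      constructor
      · rintro ((h | h) | h | h) <;> tauto
      · rintro (h | (h | h) | h) <;> tauto
    · rw [Bool.not_eq_true] at hhd
      by_cases hsh : pvShoppingTools.contains x = true
      · simp only [hhd, hsh, Bool.false_eq_true, if_false, if_true, ih, PySem.Set.mem_add,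
          List.exists_mem_cons_iff]
        simp only [false_or, true_or, and_true]
        constructor
        · rintro ((h | h) | h | h) <;>
            first
              | exact Or.inl h
              | exact Or.inr (Or.inr h)
              | exact Or.inr (Or.inl h)
              | exact Or.inr (Or.inr h.1)
        · rintro (h | h | h) <;>
            first
              | exact Or.inl (Or.inl h)
              | exact Or.inr (Or.inl h)
              | exact Or.inl (Or.inr h)
      · rw [Bool.not_eq_true] at hsh
        simp only [hhd, hsh, Bool.false_eq_true, if_false, ih, List.exists_mem_cons_iff]
        simp only [false_or]

theorem pv_countP_pos_iff (p : String → Bool) (names : List String) :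
    (0 : Int) < (names.countP p : Int) ↔ ∃ t ∈ names, p t = true := by
  rw [Int.natCast_pos, List.countP_pos_iff]

theorem pv_alt_fold (traj : List (List (String × String))) :
    traj.foldl
      (fun s tc => match pvCategory.get? (PySem.Dict.getD (PySem.Dict.mk tc) "tool_name" "") with
        | some cat => PySem.Set.add s cat
        | none => s) PySem.Set.empty =
    (traj.map (fun tc => PySem.Dict.getD (PySem.Dict.mk tc) "tool_name" "")).foldl
      (fun s t => match pvCategory.get? t with
        | some cat => PySem.Set.add s cat
        | none => s) PySem.Set.empty := by rw [List.foldl_map]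

-- ===== VERDICT (by name: the statement is the Claim_ definition above) =====
theorem detect_session_type_py_spec : Claim_equal_detect_session_type_py := by
  intro sd _
  show detect_session_type_py sd = detect_session_type_py_alt sd
  simp only [detect_session_type_py, detect_session_type_py_alt]
  rw [pv_alt_fold]
  set names := ((PySem.Dict.mk sd).getD "predicted_trajectory" []).map
      (fun tc => PySem.Dict.getD (PySem.Dict.mk tc) "tool_name" "") with hnames
  set seen := names.foldl
      (fun s t => match pvCategory.get? t with
        | some cat => PySem.Set.add s cat
        | none => s) PySem.Set.empty with hseen
  have hmem : ∀ y, y ∈ seen ↔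
      ((y = "home_decor" ∧ ∃ t ∈ names, pvHomeDecorTools.contains t = true)
       ∨ (y = "shopping" ∧ ∃ t ∈ names, pvShoppingTools.contains t = true)) := by
    intro y
    rw [hseen, pv_seen_mem]
    simp [PySem.Set.empty]
  rw [pv_count_foldl, pv_count_foldl, zero_add, zero_add]
  by_cases hP : ∃ t ∈ names, pvHomeDecorTools.contains t = true <;>
    by_cases hQ : ∃ t ∈ names, pvShoppingTools.contains t = true
  · -- mixed
    have c1 : ¬ ((0:Int) < (names.countP pvHomeDecorTools.contains : Int) ∧
        (names.countP pvHomeDecorTools.contains : Int) = 0) := by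
      rintro ⟨h1, h2⟩; omega
    have hQpos : (0:Int) < (names.countP pvShoppingTools.contains : Int) :=
      (pv_countP_pos_iff _ _).mpr hQ
    have hPpos : (0:Int) < (names.countP pvHomeDecorTools.contains : Int) :=
      (pv_countP_pos_iff _ _).mpr hP
    have e1 : PySem.Set.equal seen ["home_decor"] = false := by
      rw [Bool.eq_false_iff]
      intro h
      have := ((PySem.Set.equal_iff _ _).mp h "shopping").mp ((hmem "shopping").mpr (Or.inr ⟨rfl, hQ⟩))
      simp at this
    have e2 : PySem.Set.equal seen ["shopping"] = false := by
      rw [Bool.eq_false_iff]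
      intro h
      have := ((PySem.Set.equal_iff _ _).mp h "home_decor").mp ((hmem "home_decor").mpr (Or.inl ⟨rfl, hP⟩))
      simp at this
    have e3 : seen.isEmpty = false := by
      rw [List.isEmpty_eq_false_iff_exists_mem]
      exact ⟨"home_decor", (hmem "home_decor").mpr (Or.inl ⟨rfl, hP⟩)⟩
    simp only [e1, e2, e3, Bool.false_eq_true, if_false, Bool.not_false, if_true]
    rw [if_neg, if_neg, if_pos ⟨hPpos, hQpos⟩]
    · rintro ⟨h1, h2⟩; omega
    · rintro ⟨h1, h2⟩; omega
  · -- home_decor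
    have hQ0 : (names.countP pvShoppingTools.contains : Int) = 0 := by
      have : names.countP pvShoppingTools.contains = 0 :=
        List.countP_eq_zero.mpr (fun t ht => by
          simp only [Bool.not_eq_true]
          rw [Bool.eq_false_iff]
          exact fun hc => hQ ⟨t, ht, hc⟩)
      exact_mod_cast this
    have hPpos : (0:Int) < (names.countP pvHomeDecorTools.contains : Int) :=
      (pv_countP_pos_iff _ _).mpr hP
    have e1 : PySem.Set.equal seen ["home_decor"] = true := by
      rw [PySem.Set.equal_iff _ _]
      intro x
      rw [hmem x]
      constructor
      · rintro (⟨rfl, _⟩ | ⟨rfl, h⟩)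
        · simp
        · exact absurd h hQ
      · intro hx
        simp at hx
        exact Or.inl ⟨hx, hP⟩
    rw [if_pos ⟨hPpos, hQ0⟩, e1, if_pos rfl]
  · -- shopping
    have hP0 : (names.countP pvHomeDecorTools.contains : Int) = 0 := by
      have : names.countP pvHomeDecorTools.contains = 0 :=
        List.countP_eq_zero.mpr (fun t ht => by
          simp only [Bool.not_eq_true]
          rw [Bool.eq_false_iff]
          exact fun hc => hP ⟨t, ht, hc⟩)
      exact_mod_cast this
    have hQpos : (0:Int) < (names.countP pvShoppingTools.contains : Int) :=
      (pv_countP_pos_iff _ _).mpr hQ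
    have e1 : PySem.Set.equal seen ["home_decor"] = false := by
      rw [Bool.eq_false_iff]
      intro h
      have := ((PySem.Set.equal_iff _ _).mp h "shopping").mp ((hmem "shopping").mpr (Or.inr ⟨rfl, hQ⟩))
      simp at this
    have e2 : PySem.Set.equal seen ["shopping"] = true := by
      rw [PySem.Set.equal_iff _ _]
      intro x
      rw [hmem x]
      constructor
      · rintro (⟨rfl, h⟩ | ⟨rfl, _⟩)
        · exact absurd h hP
        · simp
      · intro hx
        simp at hx
        exact Or.inr ⟨hx, hQ⟩
    rw [if_neg, if_pos ⟨hQpos, hP0⟩, e1, e2]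
    · simp
    · rintro ⟨h1, h2⟩; omega
  · -- unknown
    have hseennil : seen = [] := by
      rw [List.eq_nil_iff_forall_not_mem]
      intro y hy
      rcases (hmem y).mp hy with ⟨_, h⟩ | ⟨_, h⟩
      · exact hP h
      · exact hQ h
    have hP0 : (names.countP pvHomeDecorTools.contains : Int) = 0 := by
      have : names.countP pvHomeDecorTools.contains = 0 :=
        List.countP_eq_zero.mpr (fun t ht => by
          simp only [Bool.not_eq_true]
          rw [Bool.eq_false_iff]
          exact fun hc => hP ⟨t, ht, hc⟩)
      exact_mod_cast this
    have hQ0 : (names.countP pvShoppingTools.contains : Int) = 0 := by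
      have : names.countP pvShoppingTools.contains = 0 :=
        List.countP_eq_zero.mpr (fun t ht => by
          simp only [Bool.not_eq_true]
          rw [Bool.eq_false_iff]
          exact fun hc => hQ ⟨t, ht, hc⟩)
      exact_mod_cast this
    have e1 : PySem.Set.equal seen ["home_decor"] = false := by
      rw [hseennil, Bool.eq_false_iff]
      intro h
      have := ((PySem.Set.equal_iff _ _).mp h "home_decor").mpr (by simp)
      simp at this
    have e2 : PySem.Set.equal seen ["shopping"] = false := by
      rw [hseennil, Bool.eq_false_iff]
      intro h
      have := ((PySem.Set.equal_iff _ _).mp h "shopping").mpr (by simp)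
      simp at this
    have e3 : seen.isEmpty = true := by rw [hseennil]; rfl
    rw [if_neg, if_neg, if_neg, e1, e2]
    · simp [e3]
    · rintro ⟨h1, h2⟩; omega
    · rintro ⟨h1, h2⟩; omega
    · rintro ⟨h1, h2⟩; omega
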